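-- pv_equiv track=rewrite | github.com/michaelkamprath/bespokeasm | src/bespokeasm/docsgen/markdown_generator.py | _optimize_table_columns
-- ===== SOURCE A (Python) =====
-- def _optimize_table_columns(
--
--     headers: list[str],
--     rows: list[list[str]]
-- ) -> tuple[list[str], list[list[str]], list[int]]:
--     """
--     Optimize table columns by removing columns that are empty for all rows.
--
--     Args:
--         headers: List of column headers
--         rows: List of rows, where each row is a list of cell values
--
--     Returns:
--         Tuple of (optimized_headers, optimized_rows)
--     """
--     if not rows or not headers:
--         return headers, rows, list(range(len(headers)))
--
--     # Determine which columns have any non-empty content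
--     columns_to_keep = []
--     for col_idx, header in enumerate(headers):
--         has_content = False
--         for row in rows:
--             if col_idx < len(row):
--                 cell_value = row[col_idx]
--                 # Consider a cell empty if it's None, empty string, or only whitespace
--                 if cell_value is not None and str(cell_value).strip():
--                     has_content = True
--                     break
--         columns_to_keep.append(has_content)
--
--     # Filter headers and rows to keep only non-empty columns
--     keep_indices = [i for i in range(len(headers)) if columns_to_keep[i]]
--     optimized_headers = [headers[i] for i in keep_indices]
--     optimized_rows = []
--     for row in rows:
--         optimized_row = [row[i] if i < len(row) else '' for i in keep_indices]
--         optimized_rows.append(optimized_row)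
--
--     return optimized_headers, optimized_rows, keep_indices
-- ===== SOURCE B (Python) =====
-- def _optimize_table_columns(
--     headers: list[str],
--     rows: list[list[str]]
-- ) -> tuple[list[str], list[list[str]], list[int]]:
--     """Single row-major pass building a boolean keep-mask over the columns,
--     then rebuild by zip-filtering headers and padded rows against the mask
--     (no per-cell index selection)."""
--     if not rows or not headers:
--         return headers, rows, list(range(len(headers)))
--
--     n = len(headers)
--     mask = [False] * n
--     for row in rows:
--         for i, cell in enumerate(row[:n]):
--             if cell is not None and str(cell).strip():
--                 mask[i] = True
--
--     keep_indices = [i for i, keep in enumerate(mask) if keep]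
--     optimized_headers = [h for h, keep in zip(headers, mask) if keep]
--     optimized_rows = [
--         [c for c, keep in zip(row + [''] * (n - len(row)), mask) if keep]
--         for row in rows
--     ]
--     return optimized_headers, optimized_rows, keep_indices
-- ===== Notes on version B (the rewrite author's own statement) =====
-- stated objective: alternative
-- what changed: Replaces A's column-major scan (rescanning the rows for each column with a break) and index-based rebuild with one row-major pass accumulating a boolean column mask, then a zip-filter of headers and padded rows against that mask.
import Mathlib
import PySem

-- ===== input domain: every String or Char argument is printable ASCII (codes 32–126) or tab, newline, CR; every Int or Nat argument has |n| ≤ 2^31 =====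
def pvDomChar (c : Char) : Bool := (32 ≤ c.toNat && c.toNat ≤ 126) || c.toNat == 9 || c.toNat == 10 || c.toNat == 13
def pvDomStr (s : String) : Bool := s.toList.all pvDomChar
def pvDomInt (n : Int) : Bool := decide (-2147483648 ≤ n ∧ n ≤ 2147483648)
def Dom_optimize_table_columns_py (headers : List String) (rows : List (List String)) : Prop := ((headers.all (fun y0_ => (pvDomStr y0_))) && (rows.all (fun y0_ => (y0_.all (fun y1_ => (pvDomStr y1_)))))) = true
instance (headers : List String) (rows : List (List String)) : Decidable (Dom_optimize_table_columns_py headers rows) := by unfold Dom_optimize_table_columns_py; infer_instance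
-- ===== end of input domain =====

-- B replaces A's column-major scan (inner row loop per column, with break) and index-based
-- rebuild by one row-major pass building a boolean column mask, then zip-filtering headers
-- and padded rows against the mask; a genuinely different decomposition of the same task.


-- ===== PORT A =====
-- shared cell test: Python's `cell_value is not None and str(cell_value).strip()`
-- (cells are str here, so this is: the stripped cell is non-empty)
def pvCellNonempty (s : String) : Bool := !(PySem.Chars.strip s.toList).isEmpty

def optimize_table_columns_py (headers : List String) (rows : List (List String)) :
    List String × List (List String) × List Int :=
  if rows.isEmpty || headers.isEmpty then
    (headers, rows, (List.range headers.length).map Int.ofNat)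
  else
    -- per-column scan over all rows, stopping at the first non-empty cell (`break` = List.any)
    let columns_to_keep : List Bool :=
      (List.range headers.length).map (fun i =>
        rows.any (fun row => decide (i < row.length) && pvCellNonempty (row.getD i "")))
    let keep_indices := (List.range headers.length).filter (fun i => columns_to_keep.getD i false)
    let optimized_headers := keep_indices.map (fun i => headers.getD i "")
    let optimized_rows := rows.map (fun row =>
      keep_indices.map (fun i => if i < row.length then row.getD i "" else ""))
    (optimized_headers, optimized_rows, keep_indices.map Int.ofNat)

-- ===== PORT B =====
-- one row of the mask pass: `for i, cell in enumerate(row[:n]): if …: mask[i] = True`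
-- (the enumerate index is ≥ 0, so `.toNat` on it is exact)
def pvMarkRow (n : Nat) (mask : List Bool) (row : List String) : List Bool :=
  (PySem.List.enumerate (row.take n) 0).foldl
    (fun m p => if pvCellNonempty p.2 then m.set p.1.toNat true else m) mask

def optimize_table_columns_py_alt (headers : List String) (rows : List (List String)) :
    List String × List (List String) × List Int :=
  if rows.isEmpty || headers.isEmpty then
    (headers, rows, (List.range headers.length).map Int.ofNat)
  else
    let n := headers.length
    let mask : List Bool := rows.foldl (pvMarkRow n) (List.replicate n false)
    let keep_indices : List Int :=
      ((PySem.List.enumerate mask 0).filter (fun p => p.2)).map (fun p => p.1)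
    let optimized_headers := ((headers.zip mask).filter (fun p => p.2)).map (fun p => p.1)
    let optimized_rows := rows.map (fun row =>
      (((row ++ List.replicate (n - row.length) "").zip mask).filter (fun p => p.2)).map (fun p => p.1))
    (optimized_headers, optimized_rows, keep_indices)

-- ===== PRECONDITION & SPEC =====
def Spec_optimize_table_columns_py (headers : List String) (rows : List (List String)) (out : List String × List (List String) × List Int) : Prop := out = optimize_table_columns_py_alt headers rows
instance (headers : List String) (rows : List (List String)) (out : List String × List (List String) × List Int) : Decidable (Spec_optimize_table_columns_py headers rows out) := by unfold Spec_optimize_table_columns_py; infer_instance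

-- ===== CLAIM (what is proved, stated in full; the proofs are below) =====
def Claim_equal_optimize_table_columns_py : Prop := ∀ (headers : List String) (rows : List (List String)), Dom_optimize_table_columns_py headers rows → Spec_optimize_table_columns_py headers rows (optimize_table_columns_py headers rows)

-- ===== LEMMAS AND PROOFS =====

-- the mark fold preserves the mask's length
lemma length_foldl_set (l : List (Int × String)) (m : List Bool) :
    (l.foldl (fun m p => if pvCellNonempty p.2 then m.set p.1.toNat true else m) m).length
      = m.length := by
  induction l generalizing m with
  | nil => rfl
  | cons p l ih => simp only [List.foldl_cons]; rw [ih]; split <;> simp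

-- getD after the mark fold: old value OR some processed pair hits index i
lemma getD_foldl_set (l : List (Int × String)) (m : List Bool) (i : Nat)
    (hl : ∀ p ∈ l, 0 ≤ p.1 ∧ p.1.toNat < m.length) :
    (l.foldl (fun m p => if pvCellNonempty p.2 then m.set p.1.toNat true else m) m).getD i false
      = (m.getD i false || l.any (fun p => p.1 == (i : Int) && pvCellNonempty p.2)) := by
  induction l generalizing m with
  | nil => simp
  | cons p l ih =>
    obtain ⟨hp0, hplt⟩ := hl p (List.mem_cons_self ..)
    have hl' : ∀ q ∈ l, 0 ≤ q.1 ∧ q.1.toNat < (if pvCellNonempty p.2 then m.set p.1.toNat true else m).length := by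
      intro q hq
      have := hl q (List.mem_cons_of_mem _ hq)
      split <;> simpa using this
    simp only [List.foldl_cons, List.any_cons]
    rw [ih _ hl']
    by_cases hc : pvCellNonempty p.2 = true
    · simp only [hc, if_true, Bool.and_true]
      by_cases hi : p.1 = (i : Int)
      · have ht : p.1.toNat = i := by omega
        have hset : (m.set p.1.toNat true).getD i false = true := by
          rw [ht, List.getD_eq_getElem?_getD, List.getElem?_set_self (by omega)]
          rfl
        have hbeq : (p.1 == (i : Int)) = true := by simp [hi]
        rw [hset, hbeq]
        simp
      · have hne : p.1.toNat ≠ i := by omega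
        have hbeq : (p.1 == (i : Int)) = false := by simp [hi]
        rw [List.getD_eq_getElem?_getD, List.getElem?_set_ne hne, ← List.getD_eq_getElem?_getD,
          hbeq]
        simp
    · simp only [Bool.not_eq_true] at hc
      rw [hc]
      simp

lemma mem_pvMark_bounds (n : Nat) (row : List String) (m : List Bool) (hm : m.length = n) :
    ∀ p ∈ PySem.List.enumerate (row.take n) 0, 0 ≤ p.1 ∧ p.1.toNat < m.length := by
  intro p hp
  rw [PySem.List.mem_enumerate_iff] at hp
  obtain ⟨k, hk, rfl⟩ := hp
  simp only [List.length_take] at hk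
  constructor
  · omega
  · simp only [Int.zero_add, Int.toNat_natCast]; omega

-- the `any` over the enumerated truncated row, at index i < n
lemma any_enumerate_take (n : Nat) (row : List String) (i : Nat) (_hi : i < n) :
    (PySem.List.enumerate (row.take n) 0).any (fun p => p.1 == (i : Int) && pvCellNonempty p.2)
      = (decide (i < row.length) && pvCellNonempty (row.getD i "")) := by
  by_cases hir : i < row.length
  · have hil : i < (row.take n).length := by simp only [List.length_take]; omega
    simp only [hir, decide_true, Bool.true_and]
    by_cases hc : pvCellNonempty (row.getD i "") = true
    · rw [hc, List.any_eq_true]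
      refine ⟨((i : Int), (row.take n)[i]), ?_, ?_⟩
      · rw [PySem.List.mem_enumerate_iff]
        exact ⟨i, hil, by simp⟩
      · simp only [beq_self_eq_true, Bool.true_and]
        rw [List.getElem_take]
        rw [List.getD_eq_getElem _ _ hir] at hc
        exact hc
    · rw [Bool.not_eq_true] at hc
      rw [hc, List.any_eq_false]
      rintro ⟨j, c⟩ hp
      rw [PySem.List.mem_enumerate_iff] at hp
      obtain ⟨k, hk, hpk⟩ := hp
      simp only [Prod.mk.injEq] at hpk
      obtain ⟨hj, hcv⟩ := hpk
      simp only [Bool.and_eq_true, beq_iff_eq, not_and]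
      intro hji
      subst hj hcv
      have hki : k = i := by omega
      subst hki
      rw [List.getElem_take]
      rw [List.getD_eq_getElem _ _ hir] at hc
      simp [hc]
  · simp only [hir, decide_false, Bool.false_and]
    rw [List.any_eq_false]
    rintro ⟨j, c⟩ hp
    rw [PySem.List.mem_enumerate_iff] at hp
    obtain ⟨k, hk, hpk⟩ := hp
    simp only [List.length_take] at hk
    simp only [Prod.mk.injEq] at hpk
    obtain ⟨hj, _⟩ := hpk
    simp only [Bool.and_eq_true, beq_iff_eq, not_and]
    intro hji
    omega

-- length of the whole mask fold
lemma length_mask_fold (n : Nat) (rows : List (List String)) (m : List Bool) :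
    (rows.foldl (pvMarkRow n) m).length = m.length := by
  induction rows generalizing m with
  | nil => rfl
  | cons r rows ih => simp only [List.foldl_cons]; rw [ih]; exact length_foldl_set _ _

-- getD characterisation of the whole mask fold (for i < n)
lemma getD_mask_fold (n : Nat) (rows : List (List String)) (m : List Bool) (i : Nat)
    (hm : m.length = n) (hi : i < n) :
    (rows.foldl (pvMarkRow n) m).getD i false
      = (m.getD i false ||
          rows.any (fun row => decide (i < row.length) && pvCellNonempty (row.getD i ""))) := by
  induction rows generalizing m with
  | nil => simp
  | cons r rows ih =>
    simp only [List.foldl_cons, List.any_cons]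
    rw [ih _ (by rw [pvMarkRow, length_foldl_set]; exact hm)]
    rw [pvMarkRow, getD_foldl_set _ _ _ (mem_pvMark_bounds n r m hm),
        any_enumerate_take n r i hi, Bool.or_assoc]

-- zip-filter against a mask = index selection through the kept indices
lemma zip_filter_eq_map_keep (xs : List String) (mask : List Bool) (h : mask.length ≤ xs.length) :
    ((xs.zip mask).filter (fun p => p.2)).map (fun p => p.1)
      = ((List.range mask.length).filter (fun i => mask.getD i false)).map (fun i => xs.getD i "") := by
  induction mask generalizing xs with
  | nil => simp
  | cons b bs ih =>
    cases xs with
    | nil => simp at h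
    | cons x xs =>
      have h' : bs.length ≤ xs.length := by simpa using h
      rw [List.length_cons, List.range_succ_eq_map]
      rw [List.filter_cons, List.filter_map]
      have hfc : (List.range bs.length).filter ((fun i => (b :: bs).getD i false) ∘ Nat.succ)
          = (List.range bs.length).filter (fun i => bs.getD i false) :=
        List.filter_congr (by intro i _; simp)
      rw [hfc, List.zip_cons_cons, List.filter_cons]
      have hmc : ((List.range bs.length).filter (fun i => bs.getD i false)).map
            ((fun i => (x :: xs).getD i "") ∘ Nat.succ)
          = ((List.range bs.length).filter (fun i => bs.getD i false)).map (fun i => xs.getD i "") :=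
        List.map_congr_left (by intro i _; simp)
      cases b
      · rw [if_neg (by simp), if_neg (by simp), List.map_map, hmc, ih xs h']
      · rw [if_pos rfl, if_pos (by simp)]
        simp only [List.map_cons, List.map_map]
        rw [hmc, ih xs h']
        rfl

-- enumerate-filter of the mask = kept indices as Int (generalised over the start offset)
lemma enumerate_filter_eq_keep_aux (mask : List Bool) (s : Int) :
    ((PySem.List.enumerate mask s).filter (fun p => p.2)).map (fun p => p.1)
      = ((List.range mask.length).filter (fun i => mask.getD i false)).map (fun i : Nat => (i : Int) + s) := by
  induction mask generalizing s with
  | nil => simp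
  | cons b bs ih =>
    rw [PySem.List.enumerate_cons, List.length_cons, List.range_succ_eq_map]
    rw [List.filter_cons, List.filter_cons, List.filter_map]
    have hfc : (List.range bs.length).filter ((fun i => (b :: bs).getD i false) ∘ Nat.succ)
        = (List.range bs.length).filter (fun i => bs.getD i false) :=
      List.filter_congr (by intro i _; simp)
    rw [hfc]
    have hmc : ((List.range bs.length).filter (fun i => bs.getD i false)).map
          ((fun i : Nat => (i : Int) + s) ∘ Nat.succ)
        = ((List.range bs.length).filter (fun i => bs.getD i false)).map (fun i : Nat => (i : Int) + (s + 1)) :=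
      List.map_congr_left (by intro i _; simp [Function.comp]; ring)
    cases b
    · rw [if_neg (by simp), if_neg (by simp)]
      simp only [List.map_map]
      rw [hmc, ih (s + 1)]
    · rw [if_pos rfl, if_pos (by simp)]
      simp only [List.map_cons, List.map_map]
      rw [hmc, ih (s + 1)]
      simp

lemma enumerate_filter_eq_keep (mask : List Bool) :
    ((PySem.List.enumerate mask 0).filter (fun p => p.2)).map (fun p => p.1)
      = ((List.range mask.length).filter (fun i => mask.getD i false)).map Int.ofNat := by
  rw [enumerate_filter_eq_keep_aux mask 0]
  exact List.map_congr_left (by intro i _; simp)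

-- A's padded-cell expression = getD into the padded row (for i < n)
lemma padded_getD (row : List String) (n i : Nat) (_hi : i < n) :
    (if i < row.length then row.getD i "" else "")
      = (row ++ List.replicate (n - row.length) "").getD i "" := by
  by_cases hir : i < row.length
  · simp [hir, List.getD_eq_getElem?_getD, List.getElem?_append_left hir]
  · simp only [hir, if_false]
    rw [List.getD_eq_getElem?_getD, List.getElem?_append_right (by omega)]
    by_cases hlt : i - row.length < n - row.length
    · simp [hlt]
    · simp [hlt]

-- ===== VERDICT (by name: the statement is the Claim_ definition above) =====
theorem optimize_table_columns_py_spec : Claim_equal_optimize_table_columns_py := by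
  intro headers rows _
  unfold Spec_optimize_table_columns_py optimize_table_columns_py optimize_table_columns_py_alt
  by_cases hbase : rows.isEmpty || headers.isEmpty
  · simp [hbase]
  · simp only [hbase, Bool.false_eq_true, if_false]
    set n := headers.length with hn
    set mask : List Bool := rows.foldl (pvMarkRow n) (List.replicate n false) with hmask
    have hmlen : mask.length = n := by
      rw [hmask, length_mask_fold]; simp
    have hmget : ∀ i < n, mask.getD i false
        = rows.any (fun row => decide (i < row.length) && pvCellNonempty (row.getD i "")) := by
      intro i hi
      rw [hmask, getD_mask_fold n rows _ i (by simp) hi]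
      simp
    have hA : ∀ i ∈ List.range n,
        (((List.range n).map (fun j =>
            rows.any (fun row => decide (j < row.length) && pvCellNonempty (row.getD j "")))).getD i false)
          = mask.getD i false := by
      intro i hi
      rw [List.mem_range] at hi
      rw [List.getD_eq_getElem?_getD, List.getElem?_map, List.getElem?_range hi]
      rw [Option.map_some, Option.getD_some]
      exact (hmget i hi).symm
    have hkeep :
        (List.range n).filter (fun i =>
            ((List.range n).map (fun j =>
              rows.any (fun row => decide (j < row.length) && pvCellNonempty (row.getD j "")))).getD i false)
          = (List.range n).filter (fun i => mask.getD i false) :=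
      List.filter_congr hA
    refine Prod.ext ?_ (Prod.ext ?_ ?_)
    · -- headers
      simp only
      rw [hkeep, zip_filter_eq_map_keep headers mask (by omega), hmlen]
    · -- rows
      simp only
      apply List.map_congr_left
      intro row _
      rw [hkeep, zip_filter_eq_map_keep (row ++ List.replicate (n - row.length) "") mask
            (by simp only [List.length_append, List.length_replicate]; omega), hmlen]
      apply List.map_congr_left
      intro i hi
      rw [List.mem_filter, List.mem_range] at hi
      exact padded_getD row n i hi.1
    · -- keep indices
      simp only
      rw [hkeep, enumerate_filter_eq_keep, hmlen]
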